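-- pv_equiv track=rewrite | github.com/Rabib001/PhishNet2 | apps/api/app/auth_results.py | _unfold_header_blocks
-- ===== SOURCE A (Python) =====
-- def _unfold_header_blocks(raw: str) -> list[tuple[str, str]]:
--     """Split raw header string into (lowercase_name, unfolded_value) pairs."""
--     if not raw or not raw.strip():
--         return []
--     lines = raw.replace("\r\n", "\n").replace("\r", "\n").split("\n")
--     out: list[tuple[str, str]] = []
--     current_name: str | None = None
--     current_parts: list[str] = []
--
--     for line in lines:
--         if not line.strip():
--             break
--         if line[0] in " \t":
--             if current_name is not None:
--                 current_parts.append(line.strip())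
--             continue
--         if current_name is not None:
--             out.append((current_name, " ".join(current_parts)))
--         if ":" not in line:
--             current_name = None
--             current_parts = []
--             continue
--         name, _, rest = line.partition(":")
--         current_name = name.strip().lower()
--         current_parts = [rest.strip()]
--
--     if current_name is not None:
--         out.append((current_name, " ".join(current_parts)))
--     return out
-- ===== SOURCE B (Python) =====
-- def _unfold_header_blocks(raw: str) -> list[tuple[str, str]]:
--     """Two-pass: group physical lines into logical (header, continuations) records,
--     then parse each record into a (name, value) pair."""
--     # pass 1: group lines up to the first blank line into logical records
--     logical: list[tuple[str, list[str]]] = []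
--     current: tuple[str, list[str]] | None = None
--     for line in raw.replace("\r\n", "\n").replace("\r", "\n").split("\n"):
--         stripped = line.strip()
--         if not stripped:
--             break
--         if line[:1] in (" ", "\t"):
--             if current is not None:
--                 current = (current[0], current[1] + [stripped])
--         else:
--             if current is not None:
--                 logical.append(current)
--             current = (line, [])
--     if current is not None:
--         logical.append(current)
--     # pass 2: parse each logical record; records without ':' are dropped
--     out: list[tuple[str, str]] = []
--     for text, parts in logical:
--         if ":" in text:
--             name, _, rest = text.partition(":")
--             out.append((name.strip().lower(), " ".join([rest.strip()] + parts)))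
--     return out
-- ===== Notes on version B (the rewrite author's own statement) =====
-- stated objective: alternative
-- what changed: Replaces A's single interleaved parse-and-emit loop (option name + parts state, emitting on each new header and after the loop) by a two-pass decomposition: pass 1 only groups physical lines into logical (header_text, continuation_parts) records up to the first blank line, pass 2 parses each record, dropping colonless ones; B also drops A's redundant empty/whitespace early-return guard.
import Mathlib
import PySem

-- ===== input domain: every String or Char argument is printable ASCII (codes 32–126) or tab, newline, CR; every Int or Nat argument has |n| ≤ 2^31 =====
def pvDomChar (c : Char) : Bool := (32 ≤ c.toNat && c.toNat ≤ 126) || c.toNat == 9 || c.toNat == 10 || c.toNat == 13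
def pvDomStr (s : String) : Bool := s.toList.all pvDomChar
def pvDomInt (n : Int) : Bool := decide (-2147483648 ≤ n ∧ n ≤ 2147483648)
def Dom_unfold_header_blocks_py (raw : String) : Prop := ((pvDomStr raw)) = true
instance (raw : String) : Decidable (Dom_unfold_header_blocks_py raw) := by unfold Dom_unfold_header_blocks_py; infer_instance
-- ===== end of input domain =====

-- B replaces A's single interleaved parse-and-emit loop by a two-pass decomposition
-- (group physical lines into logical records, then parse each record); same cost, no speed claim.


-- ===== PORT A =====
-- Both Pythons execute the same 'raw.replace("\r\n","\n").replace("\r","\n").split("\n")'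
-- and the same 'line.partition(":")' library calls; those two calls are shared helpers.
def pvSplitLines (raw : String) : List (List Char) :=
  PySem.Chars.splitOn (PySem.Chars.replace (PySem.Chars.replace raw.toList ['\r', '\n'] ['\n']) ['\r'] ['\n']) ['\n']

-- str.partition(":") in the case where ':' occurs (both programs test ':' in line before calling it)
def pvPartition (l : List Char) : List Char × List Char :=
  ((l.take (PySem.Chars.find l [':']).toNat), l.drop ((PySem.Chars.find l [':']).toNat + 1))

-- A's 'if current_name is not None: out.append((current_name, " ".join(current_parts)))'
def pvFlush : Option (List Char) → List (List Char) → List (String × String)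
  | none, _ => []
  | some n, ps => [(String.ofList n, String.ofList (PySem.Chars.join [' '] ps))]

-- A's for-loop with break: state (current_name, current_parts, out)
def unfoldA_loop : List (List Char) → Option (List Char) → List (List Char) → List (String × String) → List (String × String)
  | [], cn, cp, out => out ++ pvFlush cn cp
  | l :: ls, cn, cp, out =>
    if PySem.Chars.strip l = [] then out ++ pvFlush cn cp   -- break, then the post-loop flush
    else if PySem.Chars.isIn [PySem.List.pyGetD l 0 ' '] [' ', '\t'] then
      -- line[0] in " \t"; l ≠ [] here since its strip is nonempty, so pyGetD's default is never used
      unfoldA_loop ls cn (if cn.isSome then cp ++ [PySem.Chars.strip l] else cp) out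
    else if PySem.Chars.isIn [':'] l then
      unfoldA_loop ls (some (PySem.Chars.lower (PySem.Chars.strip (pvPartition l).1)))
        [PySem.Chars.strip (pvPartition l).2] (out ++ pvFlush cn cp)
    else
      unfoldA_loop ls none [] (out ++ pvFlush cn cp)

def unfold_header_blocks_py (raw : String) : List (String × String) :=
  if raw.toList = [] ∨ PySem.Chars.strip raw.toList = [] then []
  else unfoldA_loop (pvSplitLines raw) none [] []

-- ===== PORT B =====
def pvClose : Option (List Char × List (List Char)) → List (List Char × List (List Char))
  | none => []
  | some r => [r]

-- pass 1: group the physical lines (up to the first blank one) into logical records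
def pvGroup : List (List Char) → Option (List Char × List (List Char)) →
    List (List Char × List (List Char)) → List (List Char × List (List Char))
  | [], cur, logical => logical ++ pvClose cur
  | l :: ls, cur, logical =>
    if PySem.Chars.strip l = [] then logical ++ pvClose cur
    else if PySem.Chars.slice l none (some 1) = [' '] ∨ PySem.Chars.slice l none (some 1) = ['\t'] then
      pvGroup ls (match cur with
                  | none => none
                  | some (t, ps) => some (t, ps ++ [PySem.Chars.strip l])) logical
    else
      pvGroup ls (some (l, [])) (logical ++ pvClose cur)

-- pass 2: parse one logical record; records without ':' are dropped
def pvEmit (r : List Char × List (List Char)) : Option (String × String) :=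
  if PySem.Chars.isIn [':'] r.1 then
    some (String.ofList (PySem.Chars.lower (PySem.Chars.strip (pvPartition r.1).1)),
          String.ofList (PySem.Chars.join [' '] (PySem.Chars.strip (pvPartition r.1).2 :: r.2)))
  else none

def unfold_header_blocks_py_alt (raw : String) : List (String × String) :=
  (pvGroup (pvSplitLines raw) none []).filterMap pvEmit

-- ===== PRECONDITION & SPEC =====
def Spec_unfold_header_blocks_py (raw : String) (out : List (String × String)) : Prop := out = unfold_header_blocks_py_alt raw
instance (raw : String) (out : List (String × String)) : Decidable (Spec_unfold_header_blocks_py raw out) := by unfold Spec_unfold_header_blocks_py; infer_instance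

-- ===== CLAIM (what is proved, stated in full; the proofs are below) =====
def Claim_equal_unfold_header_blocks_py : Prop := ∀ (raw : String), Dom_unfold_header_blocks_py raw → Spec_unfold_header_blocks_py raw (unfold_header_blocks_py raw)

-- ===== LEMMAS AND PROOFS =====

-- the name/parts A would currently hold, as a function of B's open logical record
def pvCnOf : Option (List Char × List (List Char)) → Option (List Char)
  | none => none
  | some (t, _) =>
    if PySem.Chars.isIn [':'] t then some (PySem.Chars.lower (PySem.Chars.strip (pvPartition t).1)) else none

def pvCpOf : Option (List Char × List (List Char)) → List (List Char)
  | none => []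
  | some (t, ps) =>
    if PySem.Chars.isIn [':'] t then PySem.Chars.strip (pvPartition t).2 :: ps else []

theorem pvStrip_nil_iff (l : List Char) :
    PySem.Chars.strip l = [] ↔ ∀ c ∈ l, PySem.Chars.isspace c := by
  unfold PySem.Chars.strip PySem.Chars.rstrip PySem.Chars.lstrip
  rw [List.reverse_eq_nil_iff, List.dropWhile_eq_nil_iff]
  simp only [List.mem_reverse]
  constructor
  · intro h c hc
    rcases List.mem_append.mp
        ((List.takeWhile_append_dropWhile (p := PySem.Chars.isspace) (l := l)) ▸ hc) with h1 | h2
    · exact List.mem_takeWhile_imp h1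
    · exact h c h2
  · intro h c hc
    exact h c ((List.dropWhile_sublist _).subset hc)

theorem pvGroup_acc (ls : List (List Char)) :
    ∀ cur acc, pvGroup ls cur acc = acc ++ pvGroup ls cur [] := by
  induction ls with
  | nil => intro cur acc; simp [pvGroup]
  | cons l ls ih =>
    intro cur acc
    by_cases hs : PySem.Chars.strip l = []
    · simp [pvGroup, hs]
    · by_cases hw : PySem.Chars.slice l none (some 1) = [' '] ∨ PySem.Chars.slice l none (some 1) = ['\t']
      · simp only [pvGroup, if_neg hs, if_pos hw]
        exact ih _ acc
      · simp only [pvGroup, if_neg hs, if_neg hw]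
        rw [ih (some (l, [])) (acc ++ pvClose cur), ih (some (l, [])) ([] ++ pvClose cur)]
        simp

theorem pvFlush_close (cur : Option (List Char × List (List Char))) :
    pvFlush (pvCnOf cur) (pvCpOf cur) = (pvClose cur).filterMap pvEmit := by
  rcases cur with _ | ⟨t, ps⟩
  · rfl
  · by_cases h : PySem.Chars.isIn [':'] t = true
    · simp [pvCnOf, pvCpOf, pvClose, pvEmit, pvFlush, h]
    · simp [pvCnOf, pvCpOf, pvClose, pvEmit, pvFlush, h]

theorem pvContTest_eq (c : Char) (t : List Char) :
    PySem.Chars.isIn [PySem.List.pyGetD (c :: t) 0 ' '] [' ', '\t'] = true ↔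
      (PySem.Chars.slice (c :: t) none (some 1) = [' '] ∨ PySem.Chars.slice (c :: t) none (some 1) = ['\t']) := by
  have hsl : PySem.Chars.slice (c :: t) none (some 1) = [c] := by
    rw [PySem.Chars.slice_eq_listSlice]
    rw [PySem.List.slice_to (xs := c :: t) (b := 1) (by norm_num)]
    simp
  have hg : PySem.List.pyGetD (c :: t) 0 ' ' = c := by
    rw [PySem.List.pyGetD_of_nonneg _ _ le_rfl]; simp
  rw [hsl, hg]
  rw [PySem.Chars.isIn_iff_infix]
  constructor
  · intro h
    have hm : c ∈ [' ', '\t'] := h.subset (List.mem_singleton_self c)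
    simp only [List.mem_cons, List.not_mem_nil, or_false] at hm
    rcases hm with h1 | h1 <;> [left; right] <;> rw [h1]
  · rintro (h | h)
    · have : c = ' ' := by simpa using h
      exact this ▸ ⟨[], ['\t'], rfl⟩
    · have : c = '\t' := by simpa using h
      exact this ▸ ⟨[' '], [], rfl⟩

theorem pvKey (ls : List (List Char)) :
    ∀ cur out, unfoldA_loop ls (pvCnOf cur) (pvCpOf cur) out = out ++ (pvGroup ls cur []).filterMap pvEmit := by
  induction ls with
  | nil => intro cur out; simp only [unfoldA_loop, pvGroup, List.nil_append]; rw [pvFlush_close]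
  | cons l ls ih =>
    intro cur out
    by_cases hs : PySem.Chars.strip l = []
    · simp only [unfoldA_loop, pvGroup, if_pos hs, List.nil_append]; rw [pvFlush_close]
    · have hl : l ≠ [] := by intro h; apply hs; rw [h]; rfl
      obtain ⟨c, t, rfl⟩ := List.exists_cons_of_ne_nil hl
      by_cases hw : PySem.Chars.slice (c :: t) none (some 1) = [' '] ∨
          PySem.Chars.slice (c :: t) none (some 1) = ['\t']
      · have hwA : PySem.Chars.isIn [PySem.List.pyGetD (c :: t) 0 ' '] [' ', '\t'] = true :=
          (pvContTest_eq c t).mpr hw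
        simp only [unfoldA_loop, pvGroup, if_neg hs, hwA, if_pos hw, if_true]
        rcases cur with _ | ⟨u, ps⟩
        · exact ih none out
        · by_cases hcol : PySem.Chars.isIn [':'] u = true
          · have := ih (some (u, ps ++ [PySem.Chars.strip (c :: t)])) out
            simp only [pvCnOf, pvCpOf, hcol, if_true, Option.isSome_some] at this ⊢
            simpa using this
          · have := ih (some (u, ps ++ [PySem.Chars.strip (c :: t)])) out
            simp only [pvCnOf, pvCpOf, hcol, if_false, Bool.false_eq_true, Option.isSome_none] at this ⊢
            simpa using this
      · have hwA : PySem.Chars.isIn [PySem.List.pyGetD (c :: t) 0 ' '] [' ', '\t'] = false := by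
          rw [Bool.eq_false_iff]; intro h; exact hw ((pvContTest_eq c t).mp h)
        simp only [unfoldA_loop, pvGroup, if_neg hs, hwA, if_neg hw, Bool.false_eq_true, if_false]
        rw [pvGroup_acc ls (some (c :: t, [])) ([] ++ pvClose cur), List.nil_append,
          List.filterMap_append]
        by_cases hcol : PySem.Chars.isIn [':'] (c :: t) = true
        · have e1 : pvCnOf (some (c :: t, ([] : List (List Char)))) =
              some (PySem.Chars.lower (PySem.Chars.strip (pvPartition (c :: t)).1)) := by
            simp [pvCnOf, hcol]
          have e2 : pvCpOf (some (c :: t, ([] : List (List Char)))) =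
              [PySem.Chars.strip (pvPartition (c :: t)).2] := by
            simp [pvCpOf, hcol]
          have hk := ih (some (c :: t, [])) (out ++ pvFlush (pvCnOf cur) (pvCpOf cur))
          rw [e1, e2] at hk
          rw [if_pos hcol, hk, pvFlush_close, List.append_assoc]
        · have e1 : pvCnOf (some (c :: t, ([] : List (List Char)))) = none := by
            simp [pvCnOf, hcol]
          have e2 : pvCpOf (some (c :: t, ([] : List (List Char)))) = [] := by
            simp [pvCpOf, hcol]
          have hk := ih (some (c :: t, [])) (out ++ pvFlush (pvCnOf cur) (pvCpOf cur))
          rw [e1, e2] at hk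
          rw [if_neg hcol, hk, pvFlush_close, List.append_assoc]

theorem pvReplaceGo_pred (p : Char → Bool) (old new : List Char) (hn : ∀ c ∈ new, p c) :
    ∀ fuel l acc, (∀ c ∈ l, p c) → (∀ c ∈ acc, p c) →
      ∀ c ∈ PySem.Chars.replace.go old new fuel l acc, p c := by
  intro fuel
  induction fuel with
  | zero =>
    intro l acc hl ha c hc
    simp only [PySem.Chars.replace.go] at hc
    rcases List.mem_append.mp hc with h | h
    · exact ha c (List.mem_reverse.mp h)
    · exact hl c h
  | succ f ih =>
    intro l acc hl ha c hc
    match l with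
    | [] =>
      simp only [PySem.Chars.replace.go] at hc
      exact ha c (List.mem_reverse.mp hc)
    | d :: t =>
      rw [PySem.Chars.replace.go] at hc
      split at hc
      · refine ih _ _ (fun x hx => hl x (List.drop_subset _ _ hx)) (fun x hx => ?_) c hc
        rcases List.mem_append.mp hx with h | h
        · exact hn x (List.mem_reverse.mp h)
        · exact ha x h
      · refine ih _ _ (fun x hx => hl x (List.mem_cons_of_mem d hx)) (fun x hx => ?_) c hc
        rcases List.mem_cons.mp hx with h | h
        · exact h ▸ hl d (by simp)
        · exact ha x h

theorem pvReplace_pred (p : Char → Bool) (s old new : List Char)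
    (hs : ∀ c ∈ s, p c) (hn : ∀ c ∈ new, p c) :
    ∀ c ∈ PySem.Chars.replace s old new, p c := by
  intro c hc
  unfold PySem.Chars.replace at hc
  split at hc
  · rcases List.mem_append.mp hc with h | h
    · exact hn c h
    · rcases List.mem_flatMap.mp h with ⟨d, hd, hcd⟩
      rcases List.mem_cons.mp hcd with h1 | h1
      · exact h1 ▸ hs d hd
      · exact hn c h1
  · exact pvReplaceGo_pred p old new hn _ s [] hs (by simp) c hc

theorem pvSplitOnGo_pred (p : Char → Bool) (sep : List Char) :
    ∀ fuel l cur acc, (∀ c ∈ l, p c) → (∀ c ∈ cur, p c) → (∀ m ∈ acc, ∀ c ∈ m, p c) →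
      ∀ m ∈ PySem.Chars.splitOn.go sep fuel l cur acc, ∀ c ∈ m, p c := by
  intro fuel
  induction fuel with
  | zero =>
    intro l cur acc hl hc ha m hm
    simp only [PySem.Chars.splitOn.go] at hm
    rcases List.mem_cons.mp (List.mem_reverse.mp hm) with h | h
    · intro x hx
      rcases List.mem_append.mp (h ▸ hx) with h1 | h1
      · exact hc x (List.mem_reverse.mp h1)
      · exact hl x h1
    · exact ha m h
  | succ f ih =>
    intro l cur acc hl hc ha m hm
    match l with
    | [] =>
      simp only [PySem.Chars.splitOn.go] at hm
      rcases List.mem_cons.mp (List.mem_reverse.mp hm) with h | h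
      · intro x hx; exact hc x (List.mem_reverse.mp (h ▸ hx))
      · exact ha m h
    | d :: t =>
      rw [PySem.Chars.splitOn.go] at hm
      split at hm
      · refine ih _ _ _ (fun x hx => hl x (List.drop_subset _ _ hx)) (by simp)
          (fun m' hm' x hx => ?_) m hm
        rcases List.mem_cons.mp hm' with h | h
        · exact hc x (List.mem_reverse.mp (h ▸ hx))
        · exact ha m' h x hx
      · refine ih _ _ _ (fun x hx => hl x (List.mem_cons_of_mem d hx)) (fun x hx => ?_) ha m hm
        rcases List.mem_cons.mp hx with h | h
        · exact h ▸ hl d (by simp)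
        · exact hc x h

theorem pvSplitOn_pred (p : Char → Bool) (s sep : List Char) (hs : ∀ c ∈ s, p c) :
    ∀ m ∈ PySem.Chars.splitOn s sep, ∀ c ∈ m, p c := by
  unfold PySem.Chars.splitOn
  exact pvSplitOnGo_pred p sep _ s [] [] hs (by simp) (by simp)

theorem pvGuard_nil (raw : String) (h : raw.toList = [] ∨ PySem.Chars.strip raw.toList = []) :
    unfold_header_blocks_py_alt raw = [] := by
  have hall : ∀ c ∈ raw.toList, PySem.Chars.isspace c := by
    rcases h with h | h
    · intro c hc; rw [h] at hc; exact absurd hc (List.not_mem_nil)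
    · exact (pvStrip_nil_iff _).mp h
  have hnl : ∀ c ∈ ['\n'], PySem.Chars.isspace c := by
    intro c hc; simp only [List.mem_singleton] at hc; subst hc; decide
  have h1 := pvReplace_pred PySem.Chars.isspace raw.toList ['\r', '\n'] ['\n'] hall hnl
  have h2 := pvReplace_pred PySem.Chars.isspace _ ['\r'] ['\n'] h1 hnl
  have h3 := pvSplitOn_pred PySem.Chars.isspace _ ['\n'] h2
  unfold unfold_header_blocks_py_alt pvSplitLines
  rcases hls : PySem.Chars.splitOn
      (PySem.Chars.replace (PySem.Chars.replace raw.toList ['\r', '\n'] ['\n']) ['\r'] ['\n'])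
      ['\n'] with _ | ⟨l0, rest⟩
  · simp [pvGroup, pvClose]
  · have hstrip : PySem.Chars.strip l0 = [] :=
      (pvStrip_nil_iff _).mpr (h3 l0 (hls ▸ (by simp)))
    simp [pvGroup, hstrip, pvClose]

-- ===== VERDICT (by name: the statement is the Claim_ definition above) =====
theorem unfold_header_blocks_py_spec : Claim_equal_unfold_header_blocks_py := by
  intro raw _
  unfold Spec_unfold_header_blocks_py unfold_header_blocks_py
  split_ifs with h
  · exact (pvGuard_nil raw h).symm
  · show unfoldA_loop (pvSplitLines raw) none [] [] = _
    unfold unfold_header_blocks_py_alt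
    have hk := pvKey (pvSplitLines raw) none []
    simpa [pvCnOf, pvCpOf] using hk
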